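-- pv_equiv track=rewrite | github.com/shiyunalex/dam_center | error_detector.py | lvbo1
-- ===== SOURCE A (Python) =====
-- def lvbo1(data):
--     data0 = data.copy()
--     data1 = []
--     n = 7
--     bn = int(0.5 * n)
--     num = len(data)
--     if num < n:
--         return data
--     else:
--         for i in range(0, bn):
--             data1.append(data[i])
--         for i in range(bn, num - bn):
--             aa = data0[i - bn:i + bn + 1]
--             aa.sort()
--             data1.append(aa[bn])
--         for i in range(num - bn, num):
--             data1.append(data[i])
--         return data1
-- ===== SOURCE B (Python) =====
-- def lvbo1(data):
--     # Median filter, window 7: keep a sorted sliding window updated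
--     # incrementally (remove outgoing element, ordered-insert incoming one)
--     # instead of re-sorting a fresh 7-slice at every position.
--     n = 7
--     bn = 3
--     num = len(data)
--     if num < n:
--         return data
--     out = list(data[:bn])
--     win = sorted(data[:n])
--     for i in range(bn, num - bn):
--         out.append(win[bn])
--         j = i + bn + 1
--         if j < num:
--             win.remove(data[i - bn])        # drop the element leaving the window
--             x = data[j]                     # ordered insert of the element entering
--             k = 0
--             while k < len(win) and win[k] <= x:
--                 k += 1
--             win.insert(k, x)
--     return out + data[num - bn:]
-- ===== Notes on version B (the rewrite author's own statement) =====
-- stated objective: alternative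
-- what changed: Replaces A's per-position copy-and-sort of each 7-element slice by a single sorted window slid across the data: remove the outgoing element, ordered-insert the incoming one.
import Mathlib
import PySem

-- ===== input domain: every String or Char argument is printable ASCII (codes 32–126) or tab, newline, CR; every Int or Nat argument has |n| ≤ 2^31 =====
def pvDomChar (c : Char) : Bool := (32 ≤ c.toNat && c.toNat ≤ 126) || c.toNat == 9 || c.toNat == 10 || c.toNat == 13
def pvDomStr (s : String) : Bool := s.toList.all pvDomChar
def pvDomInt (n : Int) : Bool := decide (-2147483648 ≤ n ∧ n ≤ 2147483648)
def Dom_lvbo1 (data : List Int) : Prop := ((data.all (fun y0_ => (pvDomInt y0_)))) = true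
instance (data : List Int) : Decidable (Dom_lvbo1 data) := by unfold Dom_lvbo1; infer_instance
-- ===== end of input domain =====

-- B replaces A's per-position sort of each 7-slice by one sorted window slid
-- incrementally (remove the outgoing element, ordered-insert the incoming one).

-- ===== PORT A =====
-- Literal port of A.  data0 = data.copy() is the same list by value; bn = int(0.5*7) = 3
-- (the only float in A, folded to its exact value).  data[i] is in range at every use
-- (loop bounds guarantee it), ported as pyGetD with default 0; aa[bn] likewise: the
-- slice always has 7 elements.  aa.sort() is PySem.List.sorted (identity key).
def lvbo1 (data : List Int) : List Int :=
  let data0 := data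
  let bn : Int := 3
  let num : Int := data.length
  if num < 7 then data
  else
    let d1 := (PySem.List.pyRange 0 bn 1).foldl
      (fun acc i => acc ++ [PySem.List.pyGetD data i 0]) []
    let d1 := (PySem.List.pyRange bn (num - bn) 1).foldl
      (fun acc i =>
        let aa := PySem.List.slice data0 (some (i - bn)) (some (i + bn + 1))
        let aa := PySem.List.sorted aa (fun x => x) false
        acc ++ [PySem.List.pyGetD aa bn 0]) d1
    (PySem.List.pyRange (num - bn) num 1).foldl
      (fun acc i => acc ++ [PySem.List.pyGetD data i 0]) d1

-- ===== PORT B =====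
-- Ordered insert of x into the sorted window: scan past the elements ≤ x (the
-- while-loop in Source B), insert there.
def insSorted (win : List Int) (x : Int) : List Int :=
  match win with
  | [] => [x]
  | h :: t => if h ≤ x then h :: insSorted t x else x :: h :: t

-- Literal port of Source B.  win.remove(v) is remove? (v is always in the window, so the
-- getD default is never used); win[bn] and data[...] indices are always in range,
-- ported as pyGetD with default 0.
def lvbo1_alt (data : List Int) : List Int :=
  let bn : Int := 3
  let num : Int := data.length
  if num < 7 then data
  else
    let out0 := PySem.List.slice data none (some bn)
    let win0 := PySem.List.sorted (PySem.List.slice data none (some 7)) (fun x => x) false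
    let st := (PySem.List.pyRange bn (num - bn) 1).foldl
      (fun (st : List Int × List Int) i =>
        let out := st.1 ++ [PySem.List.pyGetD st.2 bn 0]
        if i + bn + 1 < num then
          let win := (PySem.List.remove? st.2 (PySem.List.pyGetD data (i - bn) 0)).getD st.2
          (out, insSorted win (PySem.List.pyGetD data (i + bn + 1) 0))
        else (out, st.2))
      (out0, win0)
    st.1 ++ PySem.List.slice data (some (num - bn)) none

-- ===== PRECONDITION & SPEC =====
def Spec_lvbo1 (data : List Int) (out : List Int) : Prop := out = lvbo1_alt data
instance (data : List Int) (out : List Int) : Decidable (Spec_lvbo1 data out) := by unfold Spec_lvbo1; infer_instance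

-- ===== CLAIM (what is proved, stated in full; the proofs are below) =====
def Claim_equal_lvbo1 : Prop := ∀ (data : List Int), Dom_lvbo1 data → Spec_lvbo1 data (lvbo1 data)

-- ===== LEMMAS AND PROOFS =====

-- B's sorted window at left edge j
def W (data : List Int) (j : Nat) : List Int :=
  PySem.List.sorted ((data.drop j).take 7) (fun x => x) false

lemma insSorted_perm (win : List Int) (x : Int) : (insSorted win x).Perm (x :: win) := by
  induction win with
  | nil => simp [insSorted]
  | cons h t ih =>
    simp only [insSorted]
    split
    · exact ((ih.cons h).trans (List.Perm.swap x h t)).symm.symm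
    · exact List.Perm.refl _

lemma insSorted_pairwise (win : List Int) (x : Int)
    (h : win.Pairwise (· ≤ ·)) : (insSorted win x).Pairwise (· ≤ ·) := by
  induction win with
  | nil => simp [insSorted]
  | cons a t ih =>
    rcases List.pairwise_cons.1 h with ⟨ha, ht⟩
    by_cases hax : a ≤ x
    · simp only [insSorted, if_pos hax]
      refine List.pairwise_cons.2 ⟨?_, ih ht⟩
      intro b hb
      rcases List.mem_cons.1 ((insSorted_perm t x).mem_iff.1 hb) with hbx | hbt
      · exact hbx ▸ hax
      · exact ha b hbt
    · simp only [insSorted, if_neg hax]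
      refine List.pairwise_cons.2 ⟨?_, h⟩
      intro b hb
      rcases List.mem_cons.1 hb with hbx | hbt
      · exact hbx ▸ ((not_le.mp hax).le)
      · exact le_trans ((not_le.mp hax).le) (ha b hbt)

lemma take7_head (data : List Int) (j : Nat) (h : j + 7 ≤ data.length) :
    (data.drop j).take 7 = data.getD j 0 :: ((data.drop (j+1)).take 6) := by
  have hj : j < data.length := by omega
  rw [List.drop_eq_getElem_cons hj, List.getD_eq_getElem data 0 hj]
  rfl

lemma take7_snoc (data : List Int) (j : Nat) (h : j + 8 ≤ data.length) :
    (data.drop (j+1)).take 7 = (data.drop (j+1)).take 6 ++ [data.getD (j+7) 0] := by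
  have h7 : j + 7 < data.length := by omega
  have hlen : 6 < (data.drop (j+1)).length := by simp; omega
  rw [List.take_add_one]
  congr 1
  rw [List.getElem?_eq_getElem hlen, List.getElem_drop, List.getD_eq_getElem data 0 h7]
  rfl

lemma W_pairwise (data : List Int) (j : Nat) : (W data j).Pairwise (· ≤ ·) :=
  PySem.List.sorted_pairwise _ _

lemma mem_W (data : List Int) (j : Nat) (h : j + 7 ≤ data.length) :
    data.getD j 0 ∈ W data j := by
  rw [W, PySem.List.mem_sorted, take7_head data j h]
  exact List.mem_cons_self

lemma W_step (data : List Int) (j : Nat) (h : j + 8 ≤ data.length) :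
    insSorted ((W data j).erase (data.getD j 0)) (data.getD (j+7) 0) = W data (j+1) := by
  set a := data.getD j 0 with ha
  set x := data.getD (j+7) 0 with hx
  set rest := (data.drop (j+1)).take 6 with hrest
  have e1 : (data.drop j).take 7 = a :: rest := take7_head data j (by omega)
  have hperm : (W data j).Perm (a :: rest) :=
    (PySem.List.sorted_perm _ _ _).trans (List.Perm.of_eq e1)
  have hperm2 : ((W data j).erase a).Perm rest := by
    have := hperm.erase a
    rwa [List.erase_cons_head] at this
  have hpw : ((W data j).erase a).Pairwise (· ≤ ·) :=
    (W_pairwise data j).sublist (List.erase_sublist)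
  have hperm3 : (insSorted ((W data j).erase a) x).Perm ((data.drop (j+1)).take 7) := by
    rw [take7_snoc data j h]
    exact (insSorted_perm _ x).trans ((hperm2.cons x).trans (List.perm_append_singleton x rest).symm)
  exact (PySem.List.sorted_id_eq_of_perm_of_pairwise _ _ hperm3 (insSorted_pairwise _ _ hpw)).symm

lemma med_eq (data : List Int) (j : Nat) :
    PySem.List.sorted (PySem.List.slice data (some ((j : Nat) : Int)) (some (((j + 7 : Nat)) : Int))) (fun x => x) false
      = W data j := by
  have e : (((j + 7 : Nat)) : Int) = ((j : Nat) : Int) + ((7 : Nat) : Int) := by push_cast; ring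
  rw [e, PySem.List.slice_natCast_add, W]

-- Joint invariant for the two middle loops: starting at position j+3 with B's window
-- equal to W data j and equal accumulators, the folds produce equal first components.
lemma loop_eq (data : List Int) :
    ∀ (m j : Nat), j + 7 + m = data.length → ∀ (accA accB : List Int), accA = accB →
    (PySem.List.pyRange (↑j + 3) ((data.length : Int) - 3) 1).foldl
      (fun acc i =>
        acc ++ [PySem.List.pyGetD
          (PySem.List.sorted (PySem.List.slice data (some (i - 3)) (some (i + 3 + 1))) (fun x => x) false)
          3 0]) accA
    = ((PySem.List.pyRange (↑j + 3) ((data.length : Int) - 3) 1).foldl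
        (fun (st : List Int × List Int) i =>
          if i + 3 + 1 < (data.length : Int) then
            (st.1 ++ [PySem.List.pyGetD st.2 3 0],
              insSorted ((PySem.List.remove? st.2 (PySem.List.pyGetD data (i - 3) 0)).getD st.2)
                (PySem.List.pyGetD data (i + 3 + 1) 0))
          else (st.1 ++ [PySem.List.pyGetD st.2 3 0], st.2))
        (accB, W data j)).1 := by
  intro m
  induction m with
  | zero =>
    intro j hm accA accB hacc
    have hlen : ((data.length : Int)) = (j : Int) + 7 := by omega
    have hr : ((data.length : Int) - 3) = ((j : Int) + 3) + 1 := by omega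
    rw [hr, PySem.List.pyRange_one_singleton]
    simp only [List.foldl_cons, List.foldl_nil]
    rw [if_neg (by omega)]
    have e1 : ((j : Int) + 3) - 3 = ((j : Nat) : Int) := by ring
    have e2 : ((j : Int) + 3) + 3 + 1 = (((j + 7 : Nat)) : Int) := by push_cast; ring
    rw [e1, e2, med_eq data j, hacc]
  | succ m ih =>
    intro j hm accA accB hacc
    have hcons : PySem.List.pyRange ((j : Int) + 3) ((data.length : Int) - 3) 1
        = ((j : Int) + 3) :: PySem.List.pyRange (((j : Int) + 3) + 1) ((data.length : Int) - 3) 1 :=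
      PySem.List.pyRange_one_cons (by omega)
    rw [hcons]
    simp only [List.foldl_cons]
    rw [if_pos (by omega)]
    have e1 : ((j : Int) + 3) - 3 = ((j : Nat) : Int) := by ring
    have e2 : ((j : Int) + 3) + 3 + 1 = (((j + 7 : Nat)) : Int) := by push_cast; ring
    rw [e1, e2, PySem.List.pyGetD_natCast, PySem.List.pyGetD_natCast,
      PySem.List.remove?_eq_some_erase _ _ (mem_W data j (by omega)), Option.getD_some,
      W_step data j (by omega)]
    have e3 : ((j : Int) + 3) + 1 = ((j + 1 : Nat) : Int) + 3 := by push_cast; ring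
    rw [e3]
    exact ih (j + 1) (by omega) _ _ (by rw [med_eq data j, hacc])

lemma first3 (data : List Int) (h : 7 ≤ data.length) :
    (PySem.List.pyRange 0 3 1).map (fun i => PySem.List.pyGetD data i 0)
      = PySem.List.slice data none (some 3) := by
  match data, h with
  | a :: b :: c :: t, _ =>
    have hr : PySem.List.pyRange 0 3 1 = [0, 1, 2] := by decide
    rw [hr]
    simp [pysem]

lemma win0_eq (data : List Int) :
    PySem.List.sorted (PySem.List.slice data none (some 7)) (fun x => x) false = W data 0 := by
  have e : (7 : Int) = ((7 : Nat) : Int) := by norm_num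
  rw [e, PySem.List.slice_to_natCast, W, List.drop_zero]

-- ===== VERDICT (by name: the statement is the Claim_ definition above) =====
theorem lvbo1_spec : Claim_equal_lvbo1 := by
  intro data _
  unfold Spec_lvbo1 lvbo1 lvbo1_alt
  by_cases h : (data.length : Int) < 7
  · simp only [if_pos h]
  · simp only [if_neg h]
    have h7 : 7 ≤ data.length := by omega
    rw [PySem.List.foldl_append_singleton_eq_map]
    have hend : (PySem.List.pyRange ((data.length : Int) - 3) (data.length : Int) 1).map
        (fun i => PySem.List.pyGetD data i 0)
        = PySem.List.slice data (some ((data.length : Int) - 3)) none := by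
      rw [PySem.List.map_pyGetD_pyRange' data 0 (by omega : (0:Int) ≤ (data.length : Int) - 3),
        PySem.List.slice_from _ (by omega)]
    rw [hend]
    congr 1
    rw [PySem.List.foldl_append_singleton_eq_map (fun i => PySem.List.pyGetD data i 0)
        (PySem.List.pyRange 0 3 1) [], List.nil_append, first3 data h7, win0_eq]
    have hl := loop_eq data (data.length - 7) 0 (by omega)
      (PySem.List.slice data none (some 3)) (PySem.List.slice data none (some 3)) rfl
    simp only [Nat.cast_zero, zero_add] at hl
    exact hl
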